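-- pv_equiv track=rewrite | github.com/lijianqiao/FastApi_admin | app/models/domain/permission.py | _path_matches
-- ===== SOURCE A (Python) =====
-- def _path_matches(pattern: str, path: str) -> bool:
--     """检查路径是否匹配模式
--
--     Args:
--         pattern: 路径模式
--         path: 实际路径
--
--     Returns:
--         是否匹配
--     """
--     # 简单的路径匹配，支持通配符 *
--     if pattern == path:
--         return True
--
--     # 支持通配符匹配
--     if "*" in pattern:
--         import fnmatch
--
--         return fnmatch.fnmatch(path, pattern)
--
--     # 支持路径参数匹配，如 /users/{id}
--     if "{" in pattern and "}" in pattern: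
--         pattern_parts = pattern.split("/")
--         path_parts = path.split("/")
--
--         if len(pattern_parts) != len(path_parts):
--             return False
--
--         for pattern_part, path_part in zip(pattern_parts, path_parts, strict=False):
--             if pattern_part.startswith("{") and pattern_part.endswith("}"):
--                 # 路径参数，跳过
--                 continue
--             if pattern_part != path_part:
--                 return False
--
--         return True
--
--     return False
-- ===== SOURCE B (Python) =====
-- # B: simple wildcard matching done directly -- '*' / '?' via an iterative
-- # state-set matcher, and the path-parameter branch as a recursive scan that
-- # consumes the path with str.partition.  Patterns mixing '*' with '[' are
-- # outside the stated precondition (bracket classes are fnmatch internals,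
-- # not part of this function's "simple wildcard" contract).
--
-- def _wild_match(pattern: str, path: str) -> bool:
--     """Full-match with '*' (any run) and '?' (any one char); other chars literal.
--
--     Iterative NFA state-set simulation: states are positions in the pattern.
--     """
--     n = len(pattern)
--
--     def close(states):
--         out = set()
--         for i in states:
--             out.add(i)
--             while i < n and pattern[i] == "*":
--                 i += 1
--                 out.add(i)
--         return out
--
--     states = close({0})
--     for ch in path:
--         nxt = set()
--         for i in states:
--             if i < n:
--                 c = pattern[i]
--                 if c == "*":
--                     nxt.add(i)
--                 elif c == "?" or c == ch:
--                     nxt.add(i + 1)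
--         states = close(nxt)
--     return n in states
--
--
-- def _segs_match(segs, path):
--     """Match path against slash-separated pattern segments; a '{...}' segment
--     matches any single path segment (possibly empty)."""
--     seg, rest = segs[0], segs[1:]
--     wild = seg.startswith("{") and seg.endswith("}")
--     if not rest:
--         return "/" not in path if wild else path == seg
--     head, slash, tail = path.partition("/")
--     if not slash:
--         return False
--     return (wild or head == seg) and _segs_match(rest, tail)
--
--
-- def _path_matches(pattern: str, path: str) -> bool:
--     if "*" in pattern:
--         return _wild_match(pattern, path)
--     if "{" in pattern and "}" in pattern:
--         return _segs_match(pattern.split("/"), path)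
--     return pattern == path
-- ===== Notes on version B (the rewrite author's own statement) =====
-- stated objective: alternative
-- what changed: The equality check is folded into each branch; the fnmatch library call is replaced by an iterative state-set matcher for the documented simple '*'/'?' wildcards; the parameter branch's split-both-lists-then-compare-positionally loop becomes a recursive scan consuming the path with str.partition. Pre_ excludes patterns combining '*' with '[', where A's value comes from fnmatch's bracket-class internals (translate's range normalisation), beyond the function's documented simple-wildcard matching; B treats '[' as a literal character there.
-- outside the precondition, e.g. on _path_matches('[a]*', 'a'): A returns True, B returns False; on _path_matches('[ab]*c', 'bc'): A returns True, B returns False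
import Mathlib
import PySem

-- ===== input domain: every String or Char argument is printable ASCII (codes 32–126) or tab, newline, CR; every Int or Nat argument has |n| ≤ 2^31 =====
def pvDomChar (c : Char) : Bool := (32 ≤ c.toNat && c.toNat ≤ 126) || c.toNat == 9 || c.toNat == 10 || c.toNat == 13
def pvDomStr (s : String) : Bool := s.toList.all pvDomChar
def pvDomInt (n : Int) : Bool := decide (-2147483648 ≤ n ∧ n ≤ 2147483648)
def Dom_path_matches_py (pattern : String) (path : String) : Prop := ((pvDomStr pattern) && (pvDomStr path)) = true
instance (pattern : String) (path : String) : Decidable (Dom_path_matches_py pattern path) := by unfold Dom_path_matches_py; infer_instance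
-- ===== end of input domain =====

-- B folds the equality check into each branch, matches '*'/'?' wildcards with an
-- iterative state-set simulation instead of the fnmatch library call, and replaces
-- the split-both-then-compare-positionally parameter branch by a recursive single
-- scan consuming the path; Pre_ excludes patterns combining '*' with '[' (bracket
-- classes, fnmatch internals beyond the documented simple-wildcard matching).

-- ===== SHARED GLOB-PATTERN TOKENIZER =====
-- Both Pythons call fnmatch.fnmatch in the '*' branch; the library call is ported
-- by hand.  The tokenizer below is a step-for-step port of the pattern scan of
-- fnmatch.translate: '*' (consecutive stars compressed), '?', '[...]' classes with
-- its '!'-negation, ']'-first, unterminated-'[' and '-'-range rules; it is exact on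
-- all inputs in Dom_path_matches_py.

inductive GTok where
  | lit  : Char → GTok
  | any  : GTok
  | star : GTok
  | cls  : Bool → List (Char × Char) → GTok
deriving DecidableEq, Repr

-- index of first `c` in `cs` at position ≥ k (Python str.find(c, k, end))
def idxOfFrom (cs : List Char) (c : Char) (k : Nat) : Option Nat :=
  match (cs.drop k).findIdx? (· == c) with
  | some d => some (k + d)
  | none => none

theorem idxOfFrom_lt (cs : List Char) (c : Char) (k j : Nat)
    (h : idxOfFrom cs c k = some j) : j < cs.length := by
  unfold idxOfFrom at h
  cases hf : (cs.drop k).findIdx? (· == c) with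
  | none => simp [hf] at h
  | some d =>
    have hd : d < (cs.drop k).length := (List.findIdx?_eq_some_iff_findIdx_eq.mp hf).1
    simp [hf] at h
    simp [List.length_drop] at hd
    omega

-- the '-'-search loop of translate: chunks of the raw class body
def dashChunks (cs : List Char) (skip : Nat) : List (List Char) :=
  match h : idxOfFrom cs '-' skip with
  | none => [cs]
  | some k => cs.take k :: dashChunks (cs.drop (k + 1)) 2
termination_by cs.length
decreasing_by
  have := idxOfFrom_lt cs '-' skip k h
  simp [List.length_drop]; omega

-- translate's "if chunk: chunks.append(chunk) else: chunks[-1] += '-'"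
def fixLast (chs : List (List Char)) : List (List Char) :=
  if chs.getLast? = some [] then
    match (chs.dropLast).getLast? with
    | some e => chs.dropLast.dropLast ++ [e ++ ['-']]
    | none => chs      -- unreachable: a found dash leaves an earlier chunk
  else chs

-- translate's right-to-left removal of empty ranges
def mergeEmpty (chs : List (List Char)) : List (List Char) :=
  match chs with
  | [] => []
  | [c] => [c]
  | c :: d :: rest =>
    match mergeEmpty (d :: rest) with
    | [] => [c]        -- unreachable
    | e :: es =>
      if (e.headD 'a') < (c.getLastD 'a') then (c.dropLast ++ e.drop 1) :: es
      else c :: e :: es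

-- chunk chars with join-dash markers, as translate's '-'.join produces them
def markedOf (chs : List (List Char)) : List (Bool × Char) :=
  match chs with
  | [] => []
  | [c] => c.map (fun x => (false, x))
  | c :: rest => c.map (fun x => (false, x)) ++ (true, '-') :: markedOf rest

-- regex character-class scan: join dashes form ranges, everything else is literal
def scanItems (m : List (Bool × Char)) : List (Char × Char) :=
  match m with
  | a :: (true, '-') :: b :: rest => (a.2, b.2) :: scanItems rest
  | a :: rest => (a.2, a.2) :: scanItems rest
  | [] => []

def classToken (chs : List (List Char)) : GTok :=
  let marked := markedOf chs
  if marked = [] then .cls false []                 -- empty class: never matches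
  else if marked = [(false, '!')] then .cls true [] -- negated empty: any char
  else if marked.head? = some (false, '!') then .cls true (scanItems (marked.drop 1))
  else .cls false (scanItems marked)

def classTok (raw : List Char) : GTok :=
  if ¬ raw.contains '-' then classToken [raw]
  else classToken (mergeEmpty (fixLast
    (dashChunks raw (if raw.head? = some '!' then 2 else 1))))

-- translate's bracket scan: optional '!', optional ']', then up to the next ']';
-- returns (raw body, rest after ']'), none if the bracket is unterminated
def classSplit2 (pre : List Char) (cs : List Char) : Option (List Char × List Char) :=
  match cs.dropWhile (· ≠ ']') with
  | ']' :: r => some (pre ++ cs.takeWhile (· ≠ ']'), r)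
  | _ => none

def classSplit (cs : List Char) : Option (List Char × List Char) :=
  match cs with
  | '!' :: ']' :: r => classSplit2 ['!', ']'] r
  | '!' :: r => classSplit2 ['!'] r
  | ']' :: r => classSplit2 [']'] r
  | r => classSplit2 [] r

theorem classSplit2_rest_le (pre cs raw rest : List Char)
    (h : classSplit2 pre cs = some (raw, rest)) : rest.length ≤ cs.length := by
  unfold classSplit2 at h
  split at h
  · rename_i r heq
    have hlen := List.length_dropWhile_le (fun x => x ≠ ']') cs
    rw [heq] at hlen
    simp at hlen
    injection h with h'
    injection h' with h1 h2
    subst h2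
    omega
  · exact absurd h (by simp)

theorem classSplit_rest_le (cs raw rest : List Char)
    (h : classSplit cs = some (raw, rest)) : rest.length ≤ cs.length := by
  unfold classSplit at h
  split at h
  · have := classSplit2_rest_le _ _ _ _ h; simp; omega
  · have := classSplit2_rest_le _ _ _ _ h; simp; omega
  · have := classSplit2_rest_le _ _ _ _ h; simp; omega
  · exact classSplit2_rest_le _ _ _ _ h

-- the main scan of fnmatch.translate (consecutive '*' compressed)
def tokenize (cs : List Char) : List GTok :=
  match cs with
  | [] => []
  | '*' :: rest => .star :: tokenize (rest.dropWhile (· == '*'))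
  | '?' :: rest => .any :: tokenize rest
  | '[' :: rest =>
    match h : classSplit rest with
    | some (raw, rest') => classTok raw :: tokenize rest'
    | none => .lit '[' :: tokenize rest
  | c :: rest => .lit c :: tokenize rest
termination_by cs.length
decreasing_by
  all_goals first
    | (have := List.length_dropWhile_le (· == '*') rest; simp; omega)
    | (have := classSplit_rest_le _ _ _ h; simp; omega)
    | simp

def inClass (is : List (Char × Char)) (c : Char) : Bool :=
  is.any (fun p => decide (p.1 ≤ c) && decide (c ≤ p.2))

-- ===== PORT A =====
-- A's fnmatch.fnmatch(path, pattern) call, ported by hand as the standard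
-- recursive backtracking matcher over the tokenized pattern: a '*' tries the rest
-- of the pattern at every suffix.  This is exactly the full-match semantics of the
-- regex fnmatch.translate builds (on POSIX os.path.normcase is the identity).
def matchToks (ts : List GTok) (s : List Char) : Bool :=
  match ts, s with
  | [], [] => true
  | [], _ :: _ => false
  | .star :: ts', s =>
    matchToks ts' s ||
      (match s with
       | [] => false
       | _ :: s' => matchToks (.star :: ts') s')
  | .any :: _, [] => false
  | .any :: ts', _ :: s' => matchToks ts' s'
  | .lit _ :: _, [] => false
  | .lit a :: ts', c :: s' => a == c && matchToks ts' s'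
  | .cls _ _ :: _, [] => false
  | .cls n is :: ts', c :: s' => (inClass is c != n) && matchToks ts' s'
termination_by (s.length, ts.length)

-- the explicit for-loop over zip(pattern_parts, path_parts), segments as char lists
def zipLoopA (pp qq : List (List Char)) : Bool :=
  match pp, qq with
  | a :: as, b :: bs =>
    if PySem.Chars.startswith a ['{'] && PySem.Chars.endswith a ['}'] then zipLoopA as bs
    else if a != b then false
    else zipLoopA as bs
  | _, _ => true

def path_matches_py (pattern : String) (path : String) : Bool :=
  if pattern == path then true
  else if PySem.Str.isIn "*" pattern then
    matchToks (tokenize pattern.toList) path.toList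
  else if PySem.Str.isIn "{" pattern && PySem.Str.isIn "}" pattern then
    let pattern_parts := (PySem.Chars.split? pattern.toList ['/']).getD []
    let path_parts := (PySem.Chars.split? path.toList ['/']).getD []
    if pattern_parts.length != path_parts.length then false
    else zipLoopA pattern_parts path_parts
  else false

-- ===== PORT B =====
-- Source B's _wild_match: an iterative NFA state-set simulation directly over the
-- pattern string (states = positions in the pattern; the closure follows '*').

def wChain (p : List Char) (i : Nat) : List Nat :=
  if h : p[i]? = some '*' then i :: wChain p (i + 1) else [i]
termination_by p.length - i
decreasing_by
  have : i < p.length := by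
    by_contra hn
    rw [List.getElem?_eq_none (by omega)] at h; simp at h
  omega

def wClose (p : List Char) (S : PySem.Set Nat) : PySem.Set Nat :=
  S.foldl (fun acc i => (wChain p i).foldl PySem.Set.add acc) PySem.Set.empty

def wStep (p : List Char) (i : Nat) (ch : Char) : List Nat :=
  match p[i]? with
  | some c => if c = '*' then [i] else if c == '?' || c == ch then [i + 1] else []
  | none => []

def wStepAll (p : List Char) (S : PySem.Set Nat) (ch : Char) : PySem.Set Nat :=
  S.foldl (fun acc i => (wStep p i ch).foldl PySem.Set.add acc) PySem.Set.empty

def wildMatch (p s : List Char) : Bool :=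
  let final := s.foldl (fun st c => wClose p (wStepAll p st c)) (wClose p (PySem.Set.ofList [0]))
  PySem.Set.contains final p.length

-- Source B's _segs_match: recursive scan of the pattern segments consuming the path
def segsMatch : List (List Char) → List Char → Bool
  | [], _ => false      -- unreachable: str.split('/') never returns an empty list
  | [seg], path =>
      if PySem.Chars.startswith seg ['{'] && PySem.Chars.endswith seg ['}'] then
        !(PySem.Chars.isIn ['/'] path)
      else path == seg
  | seg :: rest, path =>
      -- str.partition('/') ported via takeWhile/dropWhile (exact: one-char separator)
      match path.dropWhile (· ≠ '/') with
      | _ :: tail =>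
        ((PySem.Chars.startswith seg ['{'] && PySem.Chars.endswith seg ['}'])
          || path.takeWhile (· ≠ '/') == seg) && segsMatch rest tail
      | [] => false

def path_matches_py_alt (pattern : String) (path : String) : Bool :=
  if PySem.Str.isIn "*" pattern then
    wildMatch pattern.toList path.toList
  else if PySem.Str.isIn "{" pattern && PySem.Str.isIn "}" pattern then
    segsMatch ((PySem.Chars.split? pattern.toList ['/']).getD []) path.toList
  else pattern == path

-- ===== PRECONDITION & SPEC =====
-- Pre_ excludes only patterns that combine '*' with '[': there A's fnmatch call
-- interprets '[' as a bracket class (with translate's internal normalisations),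
-- which is outside this function's documented "simple wildcard *" matching, and
-- B naturally treats '[' as a literal character.
def Pre_path_matches_py (pattern : String) (path : String) : Prop :=
  ¬(PySem.Str.isIn "*" pattern = true ∧ PySem.Str.isIn "[" pattern = true)
instance (pattern : String) (path : String) : Decidable (Pre_path_matches_py pattern path) := by unfold Pre_path_matches_py; infer_instance

def pvWitness_path_matches_py : String × String := ("/users/{id}", "/users/123")

def Spec_path_matches_py (pattern : String) (path : String) (out : Bool) : Prop := out = path_matches_py_alt pattern path
instance (pattern : String) (path : String) (out : Bool) : Decidable (Spec_path_matches_py pattern path out) := by unfold Spec_path_matches_py; infer_instance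

-- ===== CLAIM (what is proved, stated in full; the proofs are below) =====
def Claim_equal_path_matches_py : Prop := ∀ (pattern : String) (path : String), Dom_path_matches_py pattern path → Pre_path_matches_py pattern path → Spec_path_matches_py pattern path (path_matches_py pattern path)

-- ===== LEMMAS AND PROOFS =====

-- ---- the parameter branch: split on '/' characterised by a structural recursion ----

def mySplit (s : List Char) (cur : List Char) : List (List Char) :=
  match s with
  | [] => [cur.reverse]
  | c :: rest => if c = '/' then cur.reverse :: mySplit rest [] else mySplit rest (c :: cur)
theorem go_eq_mySplit (fuel : Nat) : ∀ (l cur : List Char) (acc : List (List Char)),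
    l.length < fuel →
    PySem.Chars.splitOn.go ['/'] fuel l cur acc = acc.reverse ++ mySplit l cur := by
  induction fuel with
  | zero => intro l cur acc h; omega
  | succ n ih =>
    intro l cur acc h
    cases l with
    | nil => rw [PySem.Chars.splitOn.go.eq_def]; simp [mySplit]
    | cons c rest =>
      rw [PySem.Chars.splitOn.go.eq_def]
      simp only [List.isPrefixOf_cons₂, List.isPrefixOf_nil_left]
      by_cases hc : c = '/'
      · subst hc
        simp only [beq_self_eq_true, Bool.true_and, if_pos, List.length_singleton,
          List.drop_succ_cons, List.drop_zero]
        rw [ih rest [] (cur.reverse :: acc) (by simp only [List.length_cons] at h; omega)]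
        simp [mySplit]
      · have hne : (('/' : Char) == c) = false := beq_eq_false_iff_ne.mpr (Ne.symm hc)
        simp only [hne, Bool.false_and, Bool.false_eq_true, if_false]
        rw [ih rest (c :: cur) acc (by simp only [List.length_cons] at h; omega)]
        simp [mySplit, hc]

theorem splitOn_eq_mySplit (s : List Char) :
    PySem.Chars.splitOn s ['/'] = mySplit s [] := by
  unfold PySem.Chars.splitOn
  rw [go_eq_mySplit (s.length + 1) s [] [] (by omega)]
  simp

theorem isIn_single (c : Char) (s : List Char) :
    PySem.Chars.isIn [c] s = true ↔ c ∈ s := by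
  rw [PySem.Chars.isIn_iff_infix]
  constructor
  · rintro ⟨t, u, h⟩; rw [← h]; simp
  · intro h
    obtain ⟨t, u, rfl⟩ := List.append_of_mem h
    exact ⟨t, u, by simp⟩

theorem mySplit_ne_nil (s cur : List Char) : mySplit s cur ≠ [] := by
  induction s generalizing cur with
  | nil => simp [mySplit]
  | cons c rest ih => simp only [mySplit]; split <;> simp [ih]

theorem mySplit_no_slash (s : List Char) : ∀ cur, '/' ∉ s →
    mySplit s cur = [cur.reverse ++ s] := by
  induction s with
  | nil => simp [mySplit]
  | cons c rest ih =>
    intro cur h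
    simp only [List.mem_cons, not_or] at h
    simp [mySplit, Ne.symm h.1, ih (c :: cur) h.2]

theorem mySplit_cons (s : List Char) : ∀ cur, '/' ∈ s →
    mySplit s cur = (cur.reverse ++ s.takeWhile (· ≠ '/')) ::
      mySplit ((s.dropWhile (· ≠ '/')).tail) [] := by
  induction s with
  | nil => simp
  | cons c rest ih =>
    intro cur h
    by_cases hc : c = '/'
    · simp [mySplit, hc, List.takeWhile, List.dropWhile]
    · have hr : '/' ∈ rest := by rcases List.mem_cons.mp h with h' | h' <;> [exact absurd h'.symm hc; exact h']
      simp only [mySplit, if_neg hc]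
      rw [ih (c :: cur) hr]
      simp [hc]

theorem mySplit_free (s : List Char) : ∀ cur, '/' ∉ cur →
    ∀ x ∈ mySplit s cur, '/' ∉ x := by
  induction s with
  | nil => intro cur h x hx; simp [mySplit] at hx; simpa [hx]
  | cons c rest ih =>
    intro cur h x hx
    simp only [mySplit] at hx
    split at hx
    · rcases List.mem_cons.mp hx with rfl | hx
      · simpa
      · exact ih [] (by simp) x hx
    · exact ih (c :: cur) (by rename_i hc; simp [h, Ne.symm hc]) x hx

theorem drop_slash (s : List Char) (hs : '/' ∈ s) :
    ∃ tl, s.dropWhile (· ≠ '/') = '/' :: tl := by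
  induction s with
  | nil => simp at hs
  | cons c r ih =>
    by_cases hc : c = '/'
    · subst hc; exact ⟨r, by simp [List.dropWhile]⟩
    · have hr : '/' ∈ r := by rcases List.mem_cons.mp hs with h' | h' <;> [exact absurd h'.symm hc; exact h']
      obtain ⟨tl, htl⟩ := ih hr
      refine ⟨tl, ?_⟩
      rw [List.dropWhile_cons, if_pos (by simpa using hc)]
      exact htl

theorem cond0 (l : List (List Char)) (hl : l ≠ []) :
    ((([] : List (List Char)).length != l.length) = true) := by
  cases l with
  | nil => exact absurd rfl hl
  | cons a as => simp

theorem cond1 (b h : List Char) (l : List (List Char)) (hl : l ≠ []) :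
    ((([b] : List (List Char)).length != (h :: l).length) = true) := by
  cases l with
  | nil => exact absurd rfl hl
  | cons a as => simp

theorem cond2 (x y h : List Char) (rs : List (List Char)) :
    (((x :: y :: rs) : List (List Char)).length != ([h] : List (List Char)).length) = true := by
  simp

theorem segs_eq (pp : List (List Char)) (hfree : ∀ x ∈ pp, '/' ∉ x) :
    ∀ s : List Char,
    segsMatch pp s =
      (if pp.length != (mySplit s []).length then false else zipLoopA pp (mySplit s [])) := by
  induction pp with
  | nil =>
    intro s
    rw [if_pos (cond0 _ (mySplit_ne_nil s []))]
    rfl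
  | cons seg rest ih =>
    intro s
    have hsegfree : '/' ∉ seg := hfree seg (by simp)
    cases rest with
    | nil =>
      by_cases hs : '/' ∈ s
      · rw [mySplit_cons s [] hs]
        simp only [List.reverse_nil, List.nil_append]
        rw [if_pos (cond1 _ _ _ (mySplit_ne_nil _ []))]
        simp only [segsMatch]
        split
        · rw [(isIn_single '/' s).mpr hs]; rfl
        · have : s ≠ seg := by intro he; exact hsegfree (he ▸ hs)
          simp [this]
      · rw [mySplit_no_slash s [] hs]
        have hIn : PySem.Chars.isIn ['/'] s = false := by
          rw [Bool.eq_false_iff]; intro hb; exact hs ((isIn_single '/' s).mp hb)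
        rw [if_neg (by simp)]
        simp only [segsMatch, List.reverse_nil, List.nil_append, hIn]
        split
        · rename_i hw; simp [zipLoopA, hw]
        · rename_i hw
          rw [Bool.not_eq_true] at hw
          by_cases he : s = seg
          · simp [zipLoopA, hw, he]
          · simp [zipLoopA, hw, he, bne_iff_ne, Ne.symm he]
    | cons r2 rs =>
      by_cases hs : '/' ∈ s
      · obtain ⟨tl, htl⟩ := drop_slash s hs
        have htail : (s.dropWhile (· ≠ '/')).tail = tl := by rw [htl]; rfl
        rw [mySplit_cons s [] hs, htail]
        simp only [List.reverse_nil, List.nil_append]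
        have ihr := ih (fun x hx => hfree x (List.mem_cons_of_mem _ hx)) tl
        simp only [segsMatch, htl]
        rw [ihr]
        have hlen : (((seg :: r2 :: rs) : List (List Char)).length
              != ((s.takeWhile (· ≠ '/')) :: mySplit tl []).length)
            = ((r2 :: rs).length != (mySplit tl []).length) := by
          simp only [List.length_cons]
          cases h2 : ((r2 :: rs).length == (mySplit tl []).length) <;>
            simp_all [bne]
        rw [hlen]
        by_cases hL : ((r2 :: rs).length != (mySplit tl []).length) = true
        · rw [if_pos hL, if_pos hL, Bool.and_false]
        · rw [Bool.not_eq_true] at hL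
          rw [hL]
          simp only [Bool.false_eq_true, if_false]
          simp only [zipLoopA]
          split
          · rename_i hw; rw [hw, Bool.true_or, Bool.true_and]
          · rename_i hw
            rw [Bool.not_eq_true] at hw
            rw [hw, Bool.false_or]
            by_cases he : s.takeWhile (· ≠ '/') = seg
            · have h3 : (seg != s.takeWhile (· ≠ '/')) = false := by
                rw [bne_eq_false_iff_eq]; exact he.symm
              have h4 : (s.takeWhile (· ≠ '/') == seg) = true := beq_iff_eq.mpr he
              rw [h3, h4, Bool.true_and, if_neg (by simp)]
            · have h3 : (s.takeWhile (· ≠ '/') == seg) = false := beq_eq_false_iff_ne.mpr he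
              have h4 : (seg != s.takeWhile (· ≠ '/')) = true := bne_iff_ne.mpr (Ne.symm he)
              rw [h3, h4, Bool.false_and, if_pos rfl]
      · have hnd : s.dropWhile (· ≠ '/') = [] := by
          simp only [List.dropWhile_eq_nil_iff]
          intro a ha; simp; intro he; exact hs (he ▸ ha)
        rw [mySplit_no_slash s [] hs]
        simp only [segsMatch, hnd, List.reverse_nil, List.nil_append]
        rw [if_pos (cond2 _ _ _ _)]

theorem zipLoopA_refl (xs : List (List Char)) : zipLoopA xs xs = true := by
  induction xs with
  | nil => rfl
  | cons a as ih => simp only [zipLoopA]; split <;> simp [ih]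

-- ---- the '*' branch: the state-set simulation equals the backtracking matcher ----

-- reference backtracking matcher for '*'/'?' patterns (proof-side only)
def charMatch (p s : List Char) : Bool :=
  match p, s with
  | [], s => s.isEmpty
  | c :: p', s =>
    if c = '*' then
      charMatch p' s ||
        (match s with
         | [] => false
         | _ :: s' => charMatch (c :: p') s')
    else
      match s with
      | [] => false
      | d :: s' => (c == '?' || c == d) && charMatch p' s'
termination_by (s.length, p.length)

theorem charMatch_nil (s : List Char) : charMatch [] s = s.isEmpty := by
  rw [charMatch]

theorem charMatch_cons (c : Char) (p' s : List Char) :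
    charMatch (c :: p') s =
      if c = '*' then
        charMatch p' s ||
          (match s with
           | [] => false
           | _ :: s' => charMatch (c :: p') s')
      else
        match s with
        | [] => false
        | d :: s' => (c == '?' || c == d) && charMatch p' s' := by
  rw [charMatch.eq_def]

theorem charMatch_star (r s : List Char) :
    charMatch ('*' :: r) s
      = (charMatch r s || (match s with | [] => false | _ :: s' => charMatch ('*' :: r) s')) := by
  rw [charMatch_cons]; simp

theorem charMatch_other (c : Char) (p' s : List Char) (hc : c ≠ '*') :
    charMatch (c :: p') s
      = (match s with | [] => false | d :: s' => (c == '?' || c == d) && charMatch p' s') := by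
  rw [charMatch_cons, if_neg hc]

theorem mem_foldl_add (xs : List Nat) : ∀ (s : PySem.Set Nat) (y : Nat),
    (y ∈ xs.foldl PySem.Set.add s) ↔ y ∈ s ∨ y ∈ xs := by
  induction xs with
  | nil => simp
  | cons x xs ih =>
    intro s y
    simp only [List.foldl_cons, ih, PySem.Set.mem_add, List.mem_cons]
    tauto

theorem mem_foldl_fold (f : Nat → List Nat) : ∀ (S : List Nat) (A : PySem.Set Nat) (y : Nat),
    (y ∈ S.foldl (fun acc i => (f i).foldl PySem.Set.add acc) A) ↔ y ∈ A ∨ ∃ i ∈ S, y ∈ f i := by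
  intro S
  induction S with
  | nil => simp
  | cons i S ih =>
    intro A y
    simp only [List.foldl_cons, ih, mem_foldl_add, List.mem_cons]
    constructor
    · rintro (⟨h | h⟩ | ⟨j, hj, hy⟩)
      · exact Or.inl h
      · exact Or.inr ⟨i, Or.inl rfl, h⟩
      · exact Or.inr ⟨j, Or.inr hj, hy⟩
    · rintro (h | ⟨j, rfl | hj, hy⟩)
      · exact Or.inl (Or.inl h)
      · exact Or.inl (Or.inr hy)
      · exact Or.inr ⟨j, hj, hy⟩

theorem mem_wClose (p : List Char) (S : PySem.Set Nat) (y : Nat) :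
    y ∈ wClose p S ↔ ∃ i ∈ S, y ∈ wChain p i := by
  unfold wClose
  rw [mem_foldl_fold]
  simp [PySem.Set.empty]

theorem mem_wStepAll (p : List Char) (S : PySem.Set Nat) (c : Char) (y : Nat) :
    y ∈ wStepAll p S c ↔ ∃ i ∈ S, y ∈ wStep p i c := by
  unfold wStepAll
  rw [mem_foldl_fold]
  simp [PySem.Set.empty]

theorem chain_self (p : List Char) (i : Nat) : i ∈ wChain p i := by
  unfold wChain; split <;> simp

theorem drop_cons_of_getElem? (p : List Char) (i : Nat) (t : Char) (h : p[i]? = some t) :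
    p.drop i = t :: p.drop (i + 1) := by
  obtain ⟨hlt, rfl⟩ := List.getElem?_eq_some_iff.mp h
  exact List.drop_eq_getElem_cons hlt

theorem wStep_eq (p : List Char) (i : Nat) (ch t : Char) (h : p[i]? = some t) :
    wStep p i ch = if t = '*' then [i] else if t == '?' || t == ch then [i + 1] else [] := by
  unfold wStep; rw [h]

theorem wStep_none (p : List Char) (i : Nat) (ch : Char) (h : p[i]? = none) :
    wStep p i ch = [] := by
  unfold wStep; rw [h]

theorem chain_trans (p : List Char) (i : Nat) :
    ∀ j ∈ wChain p i, ∀ k ∈ wChain p j, k ∈ wChain p i := by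
  induction i using wChain.induct (p := p) with
  | case1 i h ih =>
    intro j hj k hk
    rw [wChain, dif_pos h] at hj ⊢
    rcases List.mem_cons.mp hj with rfl | hj
    · rw [wChain, dif_pos h] at hk; exact hk
    · exact List.mem_cons_of_mem _ (ih j hj k hk)
  | case2 i h =>
    intro j hj k hk
    rw [wChain, dif_neg h] at hj
    simp at hj; subst hj; exact hk

theorem chain_bound (p : List Char) (i : Nat) (hi : i ≤ p.length) :
    ∀ j ∈ wChain p i, j ≤ p.length := by
  induction i using wChain.induct (p := p) with
  | case1 i h ih =>
    intro j hj
    have hlt : i < p.length := (List.getElem?_eq_some_iff.mp h).1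
    rw [wChain, dif_pos h] at hj
    rcases List.mem_cons.mp hj with rfl | hj
    · exact hi
    · exact ih hlt j hj
  | case2 i h =>
    intro j hj
    rw [wChain, dif_neg h] at hj
    simp at hj; omega

theorem chain_up (p : List Char) (s : List Char) (i : Nat) :
    ∀ j ∈ wChain p i, charMatch (p.drop j) s = true → charMatch (p.drop i) s = true := by
  induction i using wChain.induct (p := p) with
  | case1 i h ih =>
    intro j hj hm
    rw [wChain, dif_pos h] at hj
    rcases List.mem_cons.mp hj with rfl | hj
    · exact hm
    · have := ih j hj hm
      rw [drop_cons_of_getElem? p i '*' h, charMatch_star]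
      simp [this]
  | case2 i h =>
    intro j hj hm
    rw [wChain, dif_neg h] at hj
    simp at hj; subst hj; exact hm

theorem match_nil_chain (p : List Char) (i : Nat) (hi : i ≤ p.length)
    (h : charMatch (p.drop i) [] = true) : p.length ∈ wChain p i := by
  induction i using wChain.induct (p := p) with
  | case1 i hs ih =>
    have hlt : i < p.length := (List.getElem?_eq_some_iff.mp hs).1
    rw [drop_cons_of_getElem? p i '*' hs, charMatch_star] at h
    simp at h
    rw [wChain, dif_pos hs]
    exact List.mem_cons_of_mem _ (ih hlt h)
  | case2 i hs =>
    rw [wChain, dif_neg hs]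
    rcases Nat.lt_or_ge i p.length with hlt | hge
    · have hsome : p[i]? = some p[i] := List.getElem?_eq_getElem hlt
      have hc : p[i] ≠ '*' := fun he => hs (by rw [hsome, he])
      rw [drop_cons_of_getElem? p i p[i] hsome, charMatch_other _ _ _ hc] at h
      simp at h
    · have : i = p.length := le_antisymm hi hge
      simp [this]

theorem step_forward (p : List Char) (c : Char) (s : List Char) (i : Nat)
    (h : charMatch (p.drop i) (c :: s) = true) :
    ∃ j ∈ wChain p i, ∃ j' ∈ wStep p j c, charMatch (p.drop j') s = true := by
  induction i using wChain.induct (p := p) with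
  | case1 i hs ih =>
    rw [drop_cons_of_getElem? p i '*' hs, charMatch_star] at h
    simp at h
    rw [wChain, dif_pos hs]
    rcases h with h | h
    · obtain ⟨j, hj, hres⟩ := ih h
      exact ⟨j, List.mem_cons_of_mem _ hj, hres⟩
    · refine ⟨i, List.mem_cons_self .., i, ?_, ?_⟩
      · rw [wStep_eq p i c '*' hs]; simp
      · rw [drop_cons_of_getElem? p i '*' hs]
        exact h
  | case2 i hs =>
    rw [wChain, dif_neg hs]
    rcases Nat.lt_or_ge i p.length with hlt | hge
    · have hsome : p[i]? = some p[i] := List.getElem?_eq_getElem hlt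
      have hc : p[i] ≠ '*' := fun he => hs (by rw [hsome, he])
      rw [drop_cons_of_getElem? p i p[i] hsome, charMatch_other _ _ _ hc] at h
      simp at h
      refine ⟨i, by simp, i + 1, ?_, h.2⟩
      rw [wStep_eq p i c p[i] hsome, if_neg hc,
        if_pos (by rcases h.1 with h' | h' <;> simp [h'])]
      simp
    · rw [List.drop_eq_nil_of_le hge] at h
      simp [charMatch] at h

theorem step_backward (p : List Char) (c : Char) (s : List Char) (j j' : Nat)
    (hj' : j' ∈ wStep p j c) (hm : charMatch (p.drop j') s = true) :
    charMatch (p.drop j) (c :: s) = true := by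
  cases hsome : p[j]? with
  | none => rw [wStep_none p j c hsome] at hj'; simp at hj'
  | some t =>
    rw [wStep_eq p j c t hsome] at hj'
    rw [drop_cons_of_getElem? p j t hsome]
    by_cases ht : t = '*'
    · rw [if_pos ht] at hj'
      simp at hj'
      rw [hj'] at hm
      rw [drop_cons_of_getElem? p j t hsome] at hm
      subst ht
      rw [charMatch_star]
      simp [hm]
    · rw [if_neg ht] at hj'
      by_cases hq : (t == '?' || t == c) = true
      · rw [if_pos hq] at hj'
        simp at hj'; subst hj'
        rw [charMatch_other _ _ _ ht]
        simp at hq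
        simp [hq, hm]
      · rw [if_neg hq] at hj'
        simp at hj'

theorem wStep_bound (p : List Char) (c : Char) (i j : Nat)
    (hj : j ∈ wStep p i c) : j ≤ p.length := by
  cases hsome : p[i]? with
  | none => rw [wStep_none p i c hsome] at hj; simp at hj
  | some t =>
    have hlt : i < p.length := (List.getElem?_eq_some_iff.mp hsome).1
    rw [wStep_eq p i c t hsome] at hj
    split at hj
    · simp at hj; omega
    · split at hj <;> simp at hj <;> omega

theorem run_iff (p : List Char) : ∀ (s : List Char) (S : PySem.Set Nat),
    (∀ i ∈ S, ∀ j ∈ wChain p i, j ∈ S) → (∀ i ∈ S, i ≤ p.length) →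
    (PySem.Set.contains (s.foldl (fun st c => wClose p (wStepAll p st c)) S) p.length = true
      ↔ ∃ i ∈ S, charMatch (p.drop i) s = true) := by
  intro s
  induction s with
  | nil =>
    intro S hclosed hbound
    simp only [List.foldl_nil, PySem.Set.contains_iff]
    constructor
    · intro h
      exact ⟨p.length, h, by rw [List.drop_length, charMatch_nil]; rfl⟩
    · rintro ⟨i, hi, hm⟩
      exact hclosed i hi p.length (match_nil_chain p i (hbound i hi) hm)
  | cons c s ih =>
    intro S hclosed hbound
    simp only [List.foldl_cons]
    have hclosed' : ∀ i ∈ wClose p (wStepAll p S c), ∀ j ∈ wChain p i,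
        j ∈ wClose p (wStepAll p S c) := by
      intro i hi j hj
      obtain ⟨i0, hi0, hch⟩ := (mem_wClose p _ i).mp hi
      exact (mem_wClose p _ j).mpr ⟨i0, hi0, chain_trans p i0 i hch j hj⟩
    have hbound' : ∀ i ∈ wClose p (wStepAll p S c), i ≤ p.length := by
      intro i hi
      obtain ⟨i0, hi0, hch⟩ := (mem_wClose p _ i).mp hi
      obtain ⟨i1, hi1, hstep⟩ := (mem_wStepAll p S c i0).mp hi0
      exact chain_bound p i0 (wStep_bound p c i1 i0 hstep) i hch
    rw [ih _ hclosed' hbound']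
    constructor
    · rintro ⟨i', hi', hm⟩
      obtain ⟨j0, hj0, hch⟩ := (mem_wClose p _ i').mp hi'
      obtain ⟨i, hiS, hstep⟩ := (mem_wStepAll p S c j0).mp hj0
      have hm0 : charMatch (p.drop j0) s = true := chain_up p s j0 i' hch hm
      exact ⟨i, hiS, step_backward p c s i j0 hstep hm0⟩
    · rintro ⟨i, hiS, hm⟩
      obtain ⟨j, hj, j', hj', hm'⟩ := step_forward p c s i hm
      refine ⟨j', (mem_wClose p _ j').mpr ⟨j', ?_, chain_self p j'⟩, hm'⟩
      exact (mem_wStepAll p S c j').mpr ⟨j, hclosed i hiS j hj, hj'⟩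

theorem wild_eq_charMatch (p s : List Char) :
    wildMatch p s = charMatch p s := by
  unfold wildMatch
  have hofl : PySem.Set.ofList [0] = ([0] : List Nat) := rfl
  have hclosed : ∀ i ∈ wClose p (PySem.Set.ofList [0]), ∀ j ∈ wChain p i,
      j ∈ wClose p (PySem.Set.ofList [0]) := by
    intro i hi j hj
    obtain ⟨i0, hi0, hch⟩ := (mem_wClose p _ i).mp hi
    exact (mem_wClose p _ j).mpr ⟨i0, hi0, chain_trans p i0 i hch j hj⟩
  have hbound : ∀ i ∈ wClose p (PySem.Set.ofList [0]), i ≤ p.length := by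
    intro i hi
    obtain ⟨i0, hi0, hch⟩ := (mem_wClose p _ i).mp hi
    rw [hofl] at hi0; simp at hi0; subst hi0
    exact chain_bound p 0 (Nat.zero_le _) i hch
  rw [Bool.eq_iff_iff]
  rw [run_iff p s _ hclosed hbound]
  constructor
  · rintro ⟨i, hi, hm⟩
    obtain ⟨i0, hi0, hch⟩ := (mem_wClose p _ i).mp hi
    rw [hofl] at hi0; simp at hi0; subst hi0
    simpa using chain_up p s 0 i hch hm
  · intro hm
    refine ⟨0, (mem_wClose p _ 0).mpr ⟨0, by rw [hofl]; simp, chain_self p 0⟩, by simpa using hm⟩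

-- ---- on '['-free patterns, the tokenized backtracking matcher is charMatch ----

theorem scomp (r : List Char) : ∀ s, charMatch ('*' :: '*' :: r) s = charMatch ('*' :: r) s := by
  intro s
  induction s with
  | nil =>
    rw [charMatch_star]
    simp [charMatch_star]
  | cons d s' ih =>
    rw [charMatch_star ('*' :: r), charMatch_star r]
    simp only [ih]
    cases hA : charMatch r (d :: s') <;> cases hB : charMatch ('*' :: r) s' <;>
      simp

theorem sdrop (r : List Char) : ∀ s,
    charMatch ('*' :: r) s = charMatch ('*' :: r.dropWhile (· == '*')) s := by
  induction r with
  | nil => intro s; rw [List.dropWhile_nil]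
  | cons c r' ih =>
    intro s
    by_cases hc : c = '*'
    · subst hc
      rw [scomp, ih s]
      simp
    · simp [hc]

theorem star_nil (r : List Char) :
    charMatch ('*' :: r) [] = charMatch (r.dropWhile (· == '*')) [] := by
  rw [sdrop, charMatch_star]
  simp

theorem star_step (r : List Char) (d : Char) (s' : List Char) :
    charMatch ('*' :: r) (d :: s')
      = (charMatch (r.dropWhile (· == '*')) (d :: s') || charMatch ('*' :: r) s') := by
  conv_lhs => rw [sdrop, charMatch_star]
  simp only []
  rw [← sdrop]

theorem charMatch_refl (p : List Char) : charMatch p p = true := by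
  induction p with
  | nil => rw [charMatch_nil]; rfl
  | cons c r ih =>
    by_cases hc : c = '*'
    · subst hc
      have h2 : charMatch ('*' :: r) r = true := by
        rw [charMatch_star, ih]
        simp
      rw [charMatch_star]
      simp [h2]
    · rw [charMatch_other _ _ _ hc]
      simp [ih]

theorem tokenize_other (c : Char) (r : List Char)
    (h1 : c ≠ '*') (h2 : c ≠ '?') (h3 : c ≠ '[') :
    tokenize (c :: r) = .lit c :: tokenize r := by
  rw [tokenize.eq_def]
  split
  next cs heq => exact absurd heq (by simp)
  next cs rest heq => injection heq with ha _; exact absurd ha h1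
  next cs rest heq => injection heq with ha _; exact absurd ha h2
  next cs rest heq => injection heq with ha _; exact absurd ha h3
  next cs c2 rest f1 f2 f3 heq =>
    injection heq with ha hb
    rw [← ha, ← hb]

theorem a2c : ∀ (n : Nat) (p s : List Char), p.length + s.length ≤ n → '[' ∉ p →
    matchToks (tokenize p) s = charMatch p s := by
  intro n
  induction n with
  | zero =>
    intro p s hlen _
    have hp : p = [] := List.eq_nil_of_length_eq_zero (by omega)
    have hs : s = [] := List.eq_nil_of_length_eq_zero (by omega)
    subst hp; subst hs
    rw [show tokenize [] = [] from by rw [tokenize], charMatch_nil]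
    simp [matchToks]
  | succ n ih =>
    intro p s hlen hfree
    cases p with
    | nil =>
      rw [show tokenize [] = [] from by rw [tokenize], charMatch_nil]
      cases s <;> simp [matchToks]
    | cons c r =>
      have hfr : '[' ∉ r := fun hm => hfree (List.mem_cons_of_mem _ hm)
      have hcb : c ≠ '[' := fun he => hfree (he ▸ List.mem_cons_self ..)
      by_cases hcs : c = '*'
      · subst hcs
        have hT : tokenize ('*' :: r) = .star :: tokenize (r.dropWhile (· == '*')) := by
          rw [tokenize]
        have hr'len : (r.dropWhile (· == '*')).length ≤ r.length :=
          List.length_dropWhile_le _ r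
        have hr'free : '[' ∉ r.dropWhile (· == '*') := fun hm =>
          hfr ((List.dropWhile_sublist _).mem hm)
        cases s with
        | nil =>
          rw [hT]
          simp only [matchToks]
          rw [ih _ _ (by simp at hlen ⊢; omega) hr'free, star_nil]
          simp
        | cons d s' =>
          have e1 : matchToks (tokenize (r.dropWhile (· == '*'))) (d :: s')
              = charMatch (r.dropWhile (· == '*')) (d :: s') :=
            ih _ _ (by simp at hlen ⊢; omega) hr'free
          have e2 : matchToks (tokenize ('*' :: r)) s' = charMatch ('*' :: r) s' :=
            ih _ _ (by simp at hlen ⊢; omega) hfree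
          rw [hT]
          simp only [matchToks]
          rw [e1, ← hT, e2, star_step]
      · by_cases hcq : c = '?'
        · subst hcq
          rw [show tokenize ('?' :: r) = .any :: tokenize r from by rw [tokenize]]
          cases s with
          | nil =>
            rw [charMatch_other _ _ _ hcs]
            simp [matchToks]
          | cons d s' =>
            rw [charMatch_other _ _ _ hcs]
            have h1 : matchToks (tokenize r) s' = charMatch r s' :=
              ih _ _ (by simp at hlen ⊢; omega) hfr
            simp [matchToks, h1]
        · rw [tokenize_other c r hcs hcq hcb, charMatch_other _ _ _ hcs]
          cases s with
          | nil => simp [matchToks]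
          | cons d s' =>
            have h1 : matchToks (tokenize r) s' = charMatch r s' :=
              ih _ _ (by simp at hlen ⊢; omega) hfr
            have hq : (c == '?') = false := beq_eq_false_iff_ne.mpr hcq
            simp [matchToks, h1, hq]

-- ===== VERDICT (by name: the statement is the Claim_ definition above) =====
theorem path_matches_py_spec : Claim_equal_path_matches_py := by
  intro pattern path _ hpre
  unfold Spec_path_matches_py path_matches_py path_matches_py_alt
  have hsplit : ∀ t : List Char, (PySem.Chars.split? t ['/']).getD [] = mySplit t [] := by
    intro t
    simp [PySem.Chars.split?, splitOn_eq_mySplit]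
  by_cases hstar : PySem.Str.isIn "*" pattern = true
  · rw [hstar]
    simp only [if_true]
    have hnb : '[' ∉ pattern.toList := by
      intro hm
      apply hpre
      refine ⟨hstar, ?_⟩
      rw [PySem.Str.isIn_iff_infix]
      have hl : ("[" : String).toList = ['['] := rfl
      rw [hl]
      exact (PySem.Chars.isIn_iff_infix _ _).mp ((isIn_single '[' pattern.toList).mpr hm)
    rw [wild_eq_charMatch]
    by_cases heq : pattern = path
    · subst heq
      rw [if_pos (beq_self_eq_true _), charMatch_refl]
    · rw [if_neg (by simp [beq_eq_false_iff_ne.mpr heq])]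
      exact a2c (pattern.toList.length + path.toList.length) _ _ le_rfl hnb
  · rw [Bool.not_eq_true] at hstar
    rw [hstar]
    simp only [Bool.false_eq_true, if_false]
    by_cases hbr : (PySem.Str.isIn "{" pattern && PySem.Str.isIn "}" pattern) = true
    · rw [hbr]
      simp only [if_true, hsplit]
      have hmain := segs_eq (mySplit pattern.toList []) (mySplit_free pattern.toList [] (by simp)) path.toList
      by_cases heq : pattern = path
      · subst heq
        rw [if_pos (beq_self_eq_true _), hmain]
        rw [if_neg (by simp), zipLoopA_refl]
      · rw [if_neg (by simp [beq_eq_false_iff_ne.mpr heq]), hmain]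
    · rw [Bool.not_eq_true] at hbr
      rw [hbr]
      simp only [Bool.false_eq_true, if_false]
      by_cases heq : pattern = path
      · subst heq
        rw [if_pos (beq_self_eq_true _), beq_self_eq_true]
      · rw [if_neg (by simp [beq_eq_false_iff_ne.mpr heq]), beq_eq_false_iff_ne.mpr heq]
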